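-- pv_equiv track=rewrite | github.com/vinay-deshmukh/Sheet-Disk | sheet_disk/utils.py | work_divider
-- ===== SOURCE A (Python) =====
-- def work_divider(no_of_cells, n_threads):
--     '''Divide the no of cells almost equally among n_threads
--
--     no_of_cells = The number of cells we need to divide among threads
--     n_threads = The number of threads among which we divide the cells
--     '''
--
--     # https://math.stackexchange.com/a/1081099
--
--     N = no_of_cells
--     M = n_threads
--     for i, k in enumerate(range(M)):
--         start_index = (N * k) // M + 1 # +1 since cells are 1-indexed
--         inc = (N *(k+1))//M - start_index
--         end_index = start_index + inc
--
--         # i is the thread number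
--         yield i, start_index, end_index
-- ===== SOURCE B (Python) =====
-- def work_divider(no_of_cells, n_threads):
--     '''Divide the no of cells almost equally among n_threads.
--
--     Bresenham-style decomposition: one divmod up front, then a loop that
--     distributes the remainder with an error accumulator -- no per-iteration
--     multiplication or division.'''
--     if n_threads <= 0:
--         return
--     d, r = divmod(no_of_cells, n_threads)
--     end = 0
--     acc = 0
--     for i in range(n_threads):
--         start = end + 1
--         acc += r
--         if acc >= n_threads:
--             acc -= n_threads
--             end += d + 1
--         else:
--             end += d
--         yield i, start, end
-- ===== Notes on version B (the rewrite author's own statement) =====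
-- stated objective: faster
-- what changed: Replaces the per-index closed-form N*k//M multiply-and-divide with a Bresenham-style error accumulator: one divmod up front, then a loop carrying a running end position and remainder accumulator using only additions/comparisons (no bignum multiplication or division per iteration).
import Mathlib
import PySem

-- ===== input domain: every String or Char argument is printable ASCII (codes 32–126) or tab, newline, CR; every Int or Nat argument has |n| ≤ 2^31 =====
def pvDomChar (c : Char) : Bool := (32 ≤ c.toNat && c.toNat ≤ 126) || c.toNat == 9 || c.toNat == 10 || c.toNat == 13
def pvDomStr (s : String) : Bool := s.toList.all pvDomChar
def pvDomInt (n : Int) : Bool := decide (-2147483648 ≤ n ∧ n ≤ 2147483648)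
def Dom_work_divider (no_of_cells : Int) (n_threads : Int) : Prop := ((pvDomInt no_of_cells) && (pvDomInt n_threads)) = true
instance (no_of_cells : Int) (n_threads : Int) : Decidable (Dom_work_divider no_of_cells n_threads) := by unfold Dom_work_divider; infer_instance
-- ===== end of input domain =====

-- B replaces A's per-index closed-form N*k//M arithmetic with a Bresenham-style error
-- accumulator (one divmod up front, then additions only); equal return values.
-- (Both Pythons are generators; the equivalence is about the list of yielded tuples.)

-- ===== PORT A =====
def work_divider (no_of_cells : Int) (n_threads : Int) : List (Int × Int × Int) :=
  let N := no_of_cells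
  let M := n_threads
  (PySem.List.enumerate (PySem.List.pyRange 0 M 1) 0).map (fun ik =>
    let start_index := PySem.Int.floordiv (N * ik.2) M + 1
    let inc := PySem.Int.floordiv (N * (ik.2 + 1)) M - start_index
    let end_index := start_index + inc
    (ik.1, start_index, end_index))

-- ===== PORT B =====
def work_divider_alt (no_of_cells : Int) (n_threads : Int) : List (Int × Int × Int) :=
  if n_threads ≤ 0 then []
  else
    -- d, r = divmod(no_of_cells, n_threads)  (n_threads > 0 here, so divmod is exact)
    let d := PySem.Int.floordiv no_of_cells n_threads
    let r := PySem.Int.mod no_of_cells n_threads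
    let st := (PySem.List.pyRange 0 n_threads 1).foldl
      (fun (s : Int × Int × List (Int × Int × Int)) i =>
        let start := s.1 + 1
        let acc := s.2.1 + r
        if acc ≥ n_threads then
          (s.1 + d + 1, acc - n_threads, s.2.2 ++ [(i, start, s.1 + d + 1)])
        else
          (s.1 + d, acc, s.2.2 ++ [(i, start, s.1 + d)]))
      (0, 0, [])
    st.2.2

-- ===== PRECONDITION & SPEC =====
def Spec_work_divider (no_of_cells : Int) (n_threads : Int) (out : List (Int × Int × Int)) : Prop := out = work_divider_alt no_of_cells n_threads
instance (no_of_cells : Int) (n_threads : Int) (out : List (Int × Int × Int)) : Decidable (Spec_work_divider no_of_cells n_threads out) := by unfold Spec_work_divider; infer_instance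

-- ===== CLAIM =====
def Claim_equal_work_divider : Prop := ∀ (no_of_cells : Int) (n_threads : Int), Dom_work_divider no_of_cells n_threads → Spec_work_divider no_of_cells n_threads (work_divider no_of_cells n_threads)

-- ===== LEMMAS AND PROOFS =====

-- enumerating range(a, b) starting the counter at a pairs each element with itself
theorem enumerate_pyRange_self (a b : Int) :
    PySem.List.enumerate (PySem.List.pyRange a b 1) a
      = (PySem.List.pyRange a b 1).map (fun k => (k, k)) := by
  rcases le_or_gt b a with h | h
  · simp [PySem.List.pyRange_one_eq_nil h]
  · have hn : (b - a).toNat ≠ 0 := by omega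
    obtain ⟨n, hn'⟩ := Nat.exists_eq_succ_of_ne_zero hn
    clear hn h
    induction n generalizing a with
    | zero =>
      have hb : b = a + 1 := by omega
      subst hb
      simp [PySem.List.pyRange_one_singleton, PySem.List.enumerate]
    | succ m ih =>
      have hab : a < b := by omega
      rw [PySem.List.pyRange_one_cons hab]
      simp only [PySem.List.enumerate_cons, List.map_cons]
      rw [ih (a + 1) (by omega)]

-- one Bresenham step: carrying (N*k)//M and (N*k)%M across, adding d and distributing r
theorem bres_step (N M k : Int) (hM : 0 < M) :
    (PySem.Int.mod (N * k) M + PySem.Int.mod N M ≥ M →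
      PySem.Int.floordiv (N * (k + 1)) M = PySem.Int.floordiv (N * k) M + PySem.Int.floordiv N M + 1 ∧
      PySem.Int.mod (N * (k + 1)) M = PySem.Int.mod (N * k) M + PySem.Int.mod N M - M) ∧
    (¬ PySem.Int.mod (N * k) M + PySem.Int.mod N M ≥ M →
      PySem.Int.floordiv (N * (k + 1)) M = PySem.Int.floordiv (N * k) M + PySem.Int.floordiv N M ∧
      PySem.Int.mod (N * (k + 1)) M = PySem.Int.mod (N * k) M + PySem.Int.mod N M) := by
  set p := PySem.Int.floordiv (N * k) M with hp
  set a := PySem.Int.mod (N * k) M with ha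
  set d := PySem.Int.floordiv N M with hd
  set r := PySem.Int.mod N M with hr
  have e1 : p * M + a = N * k := PySem.Int.floordiv_mul_add_mod (N * k) M
  have e2 : d * M + r = N := PySem.Int.floordiv_mul_add_mod N M
  have ha' : 0 ≤ a ∧ a < M := by
    rw [ha, PySem.Int.mod_eq_emod_of_pos hM]
    exact ⟨Int.emod_nonneg _ (by omega), Int.emod_lt_of_pos _ hM⟩
  have hr' : 0 ≤ r ∧ r < M := by
    rw [hr, PySem.Int.mod_eq_emod_of_pos hM]
    exact ⟨Int.emod_nonneg _ (by omega), Int.emod_lt_of_pos _ hM⟩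
  have hx : N * (k + 1) = (p + d) * M + (a + r) := by linear_combination -e1 - e2
  constructor
  · intro hge
    have hq : PySem.Int.floordiv (N * (k + 1)) M = p + d + 1 := by
      rw [PySem.Int.floordiv_eq_iff_of_pos hM, hx]
      constructor <;> nlinarith
    refine ⟨hq, ?_⟩
    have := PySem.Int.floordiv_mul_add_mod (N * (k + 1)) M
    rw [hq] at this
    nlinarith [this, hx]
  · intro hlt
    have hq : PySem.Int.floordiv (N * (k + 1)) M = p + d := by
      rw [PySem.Int.floordiv_eq_iff_of_pos hM, hx]
      constructor <;> nlinarith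
    refine ⟨hq, ?_⟩
    have := PySem.Int.floordiv_mul_add_mod (N * (k + 1)) M
    rw [hq] at this
    nlinarith [this, hx]

-- B's loop invariant: after the first n iterations the state is
-- (⌊N*n/M⌋, (N*n) mod M, the first n output tuples in closed form)
theorem bres_loop (N M : Int) (hM : 0 < M) (n : Nat) (hn : (n : Int) ≤ M) :
    (PySem.List.pyRange 0 (n : Int) 1).foldl
      (fun (s : Int × Int × List (Int × Int × Int)) i =>
        let start := s.1 + 1
        let acc := s.2.1 + PySem.Int.mod N M
        if acc ≥ M then
          (s.1 + PySem.Int.floordiv N M + 1, acc - M,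
            s.2.2 ++ [(i, start, s.1 + PySem.Int.floordiv N M + 1)])
        else
          (s.1 + PySem.Int.floordiv N M, acc,
            s.2.2 ++ [(i, start, s.1 + PySem.Int.floordiv N M)]))
      (0, 0, [])
    = (PySem.Int.floordiv (N * n) M, PySem.Int.mod (N * n) M,
       (PySem.List.pyRange 0 (n : Int) 1).map (fun k =>
         (k, PySem.Int.floordiv (N * k) M + 1, PySem.Int.floordiv (N * (k + 1)) M))) := by
  induction n with
  | zero =>
    have h0 : PySem.List.pyRange 0 (0 : Int) 1 = [] := PySem.List.pyRange_one_eq_nil le_rfl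
    simp only [Nat.cast_zero, h0, List.foldl_nil, List.map_nil, mul_zero]
    have : PySem.Int.floordiv 0 M = 0 := by
      rw [PySem.Int.floordiv_eq_ediv_of_pos hM]; simp
    have h2 : PySem.Int.mod 0 M = 0 := by
      rw [PySem.Int.mod_eq_emod_of_pos hM]; simp
    rw [this, h2]
  | succ m ih =>
    have hm : (m : Int) ≤ M := by push_cast at hn ⊢; omega
    have hsplit : PySem.List.pyRange 0 ((m : Int) + 1) 1
        = PySem.List.pyRange 0 (m : Int) 1 ++ [(m : Int)] :=
      PySem.List.pyRange_one_succ_right (by positivity)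
    push_cast
    rw [hsplit, List.foldl_append, ih hm, List.map_append]
    obtain ⟨hge, hlt⟩ := bres_step N M (m : Int) hM
    by_cases h : PySem.Int.mod (N * m) M + PySem.Int.mod N M ≥ M
    · obtain ⟨hq, hr⟩ := hge h
      simp only [List.foldl_cons, List.foldl_nil, if_pos h, hq, hr, List.map_cons, List.map_nil]
    · obtain ⟨hq, hr⟩ := hlt h
      simp only [List.foldl_cons, List.foldl_nil, if_neg h, hq, hr, List.map_cons, List.map_nil]

theorem work_divider_spec : Claim_equal_work_divider := by
  intro N M _
  unfold Spec_work_divider work_divider work_divider_alt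
  rcases le_or_gt M 0 with h | h
  · simp [PySem.List.pyRange_one_eq_nil h, h]
  · simp only [if_neg (by omega : ¬ M ≤ 0)]
    have hMn : ((M.toNat : Nat) : Int) = M := by omega
    have := bres_loop N M h M.toNat (by omega)
    rw [hMn] at this
    rw [this]
    rw [enumerate_pyRange_self, List.map_map]
    refine List.map_congr_left (fun k hk => ?_)
    simp only [Function.comp_apply]
    refine Prod.ext rfl (Prod.ext rfl ?_)
    ring
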